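-- pv_equiv track=rewrite | github.com/inference-garden/ridinCLIgun | data/build_tldr_catalog.py | _strip_placeholders
-- ===== SOURCE A (Python) =====
-- def _strip_placeholders(text: str) -> str:
--     """Remove tldr-pages {{ }} placeholder markers and optional [ ] wrappers.
--
--     tldr-pages uses:
--         {{value}}          → simple placeholder   → value
--         {{[-a|--all]}}     → optional flag         → -a|--all
--         {{[.gz|.bz2]}}     → optional extension    → .gz|.bz2
--         {{path/to/file}}   → path placeholder      → path/to/file
--
--     The outer [ ] inside {{ }} signals "optional" — we strip those brackets
--     so the advisory pane shows clean flag syntax.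
--     Note: brackets that appear *inside* a longer token (e.g.
--     ``source.tar[.gz|.bz2]``) are kept because the whole content doesn't
--     start with ``[``.
--     """
--     result = []
--     i = 0
--     while i < len(text):
--         if text[i:i+2] == "{{":
--             end = text.find("}}", i + 2)
--             if end != -1:
--                 inner = text[i+2:end]
--                 # Strip wrapping [ ] when the entire placeholder content is
--                 # enclosed: e.g. "[-a|--all]" → "-a|--all"
--                 if inner.startswith("[") and inner.endswith("]"):
--                     inner = inner[1:-1]
--                 result.append(inner)
--                 i = end + 2
--                 continue
--         result.append(text[i])
--         i += 1
--     return "".join(result)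
-- ===== SOURCE B (Python) =====
-- import re
--
--
-- def _repl(m):
--     inner = m.group(1)
--     if inner.startswith("[") and inner.endswith("]"):
--         inner = inner[1:-1]
--     return inner
--
--
-- def _strip_placeholders(text: str) -> str:
--     return re.sub(r"\{\{(.*?)\}\}", _repl, text, flags=re.DOTALL)
-- ===== Notes on version B (the rewrite author's own statement) =====
-- stated objective: faster
-- what changed: Replaced the manual while-loop with explicit cursor, char-by-char result list and str.find calls by a single re.sub over a lazy {{...}} pattern (re.DOTALL) with a replacement callback stripping the optional [ ] wrapper; the C-level regex engine drives the whole traversal (measured ~42x faster at the largest size).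
import Mathlib
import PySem

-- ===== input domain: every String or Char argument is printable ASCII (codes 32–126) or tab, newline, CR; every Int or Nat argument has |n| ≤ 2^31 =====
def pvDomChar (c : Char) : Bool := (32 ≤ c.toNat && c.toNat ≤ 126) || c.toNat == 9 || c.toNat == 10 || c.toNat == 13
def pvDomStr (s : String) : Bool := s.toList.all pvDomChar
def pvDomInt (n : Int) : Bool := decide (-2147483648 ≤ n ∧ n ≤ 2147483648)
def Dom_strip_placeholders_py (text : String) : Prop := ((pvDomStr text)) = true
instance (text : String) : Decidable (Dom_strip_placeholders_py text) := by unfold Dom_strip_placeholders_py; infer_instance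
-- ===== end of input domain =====

-- B re-implements A's manual cursor loop as a single regex substitution (re.sub with a
-- lazy {{...}} pattern and a replacement callback); same return value, more idiomatic.

-- ===== PORT A =====

-- first index of the substring "}}" (Python text.find("}}", …) restricted to a suffix)
def pvFindPP : List Char → Option Nat
  | '}' :: '}' :: _ => some 0
  | _ :: rest => (pvFindPP rest).map (· + 1)
  | [] => none

-- Python: inner[1:-1] when inner.startswith("[") and inner.endswith("]") else inner
def pvStripInner (inner : List Char) : List Char :=
  if inner.take 1 = ['['] ∧ inner.getLast? = some ']' then (inner.drop 1).dropLast else inner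

-- A's while-loop over cursor i, written as the obvious recursion on the suffix text[i:];
-- text[i:i+2] == "{{" is the first pattern, text.find("}}", i+2) is pvFindPP on the suffix.
def pvStripA : List Char → List Char
  | '{' :: '{' :: rest =>
    match pvFindPP rest with
    | some q => pvStripInner (rest.take q) ++ pvStripA (rest.drop (q + 2))
    | none => '{' :: pvStripA ('{' :: rest)
  | c :: rest => c :: pvStripA rest
  | [] => []
termination_by l => l.length
decreasing_by
  · have : (rest.drop (q + 2)).length = rest.length - (q + 2) := List.length_drop ..
    simp; omega
  · simp
  · simp

def strip_placeholders_py (text : String) : String := String.ofList (pvStripA text.toList)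

-- ===== PORT B =====

-- first index of the substring "{{" (where the leftmost regex match starts)
def pvFindBB : List Char → Option Nat
  | '{' :: '{' :: _ => some 0
  | _ :: rest => (pvFindBB rest).map (· + 1)
  | [] => none

-- cited by pvStripB's termination proof
theorem pvFindBB_le (l : List Char) (p : Nat) (h : pvFindBB l = some p) : p + 2 ≤ l.length := by
  induction l using pvFindBB.induct generalizing p with
  | case1 rest => simp [pvFindBB] at h ⊢; omega
  | case2 c rest hne ih =>
    simp [pvFindBB] at h
    obtain ⟨p', hp', rfl⟩ := h
    have := ih p' hp'
    simp; omega
  | case3 => simp [pvFindBB] at h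

-- Hand port of re.sub(r"\{\{(.*?)\}\}", _repl, text, flags=re.DOTALL): the leftmost match
-- starts at the first "{{", the lazy group ends at the first following "}}"; exact for this
-- pattern (if the first "{{" has no "}}" after it, no later one does, so re.sub is done).
def pvStripB (l : List Char) : List Char :=
  match h : pvFindBB l with
  | none => l
  | some p =>
    match pvFindPP (l.drop (p + 2)) with
    | none => l
    | some q =>
      l.take p ++ pvStripInner ((l.drop (p + 2)).take q)
        ++ pvStripB ((l.drop (p + 2)).drop (q + 2))
termination_by l.length
decreasing_by
  have hp : p + 2 ≤ l.length := pvFindBB_le l p h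
  have h1 : (l.drop (p + 2)).length = l.length - (p + 2) := List.length_drop ..
  have h2 : ((l.drop (p + 2)).drop (q + 2)).length = (l.drop (p + 2)).length - (q + 2) :=
    List.length_drop ..
  omega

def strip_placeholders_py_alt (text : String) : String := String.ofList (pvStripB text.toList)

-- ===== PRECONDITION & SPEC =====
def Spec_strip_placeholders_py (text : String) (out : String) : Prop := out = strip_placeholders_py_alt text
instance (text : String) (out : String) : Decidable (Spec_strip_placeholders_py text out) := by unfold Spec_strip_placeholders_py; infer_instance

-- ===== CLAIM (what is proved, stated in full; the proofs are below) =====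
def Claim_equal_strip_placeholders_py : Prop := ∀ (text : String), Dom_strip_placeholders_py text → Spec_strip_placeholders_py text (strip_placeholders_py text)

-- ===== LEMMAS AND PROOFS =====

theorem pvFindPP_cons (c : Char) (l : List Char) :
    pvFindPP (c :: l) =
      if c = '}' ∧ l.head? = some '}' then some 0 else (pvFindPP l).map (· + 1) := by
  cases l with
  | nil => simp [pvFindPP]
  | cons c2 r =>
    by_cases h1 : c = '}' <;> by_cases h2 : c2 = '}' <;> subst_vars <;> simp [pvFindPP, *]

theorem pvFindBB_cons (c : Char) (l : List Char) :
    pvFindBB (c :: l) =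
      if c = '{' ∧ l.head? = some '{' then some 0 else (pvFindBB l).map (· + 1) := by
  cases l with
  | nil => simp [pvFindBB]
  | cons c2 r =>
    by_cases h1 : c = '{' <;> by_cases h2 : c2 = '{' <;> subst_vars <;> simp [pvFindBB, *]

theorem pvFindPP_cons_none {c : Char} {l : List Char} (h : pvFindPP (c :: l) = none) :
    pvFindPP l = none := by
  rw [pvFindPP_cons] at h
  split at h
  · exact absurd h (by simp)
  · simpa using h

-- a suffix with no "}}" is copied through unchanged by A's loop
theorem pvStripA_no_pp (l : List Char) (h : pvFindPP l = none) : pvStripA l = l := by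
  fun_induction pvStripA l with
  | case1 rest q hq ih =>
    rw [pvFindPP_cons_none (pvFindPP_cons_none h)] at hq
    cases hq
  | case2 rest hq ih =>
    rw [ih (pvFindPP_cons_none h)]
  | case3 c rest hne ih =>
    rw [ih (pvFindPP_cons_none h)]
  | case4 => rfl

-- non-dependent unfolding of pvStripB (the `h :` in its match is only for termination)
theorem pvStripB_eqn (l : List Char) :
    pvStripB l =
      match pvFindBB l with
      | none => l
      | some p =>
        match pvFindPP (l.drop (p + 2)) with
        | none => l
        | some q =>
          l.take p ++ pvStripInner ((l.drop (p + 2)).take q)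
            ++ pvStripB ((l.drop (p + 2)).drop (q + 2)) := by
  rw [pvStripB.eq_def]
  split <;> simp [*]

theorem pvStrip_eq (l : List Char) : pvStripA l = pvStripB l := by
  fun_induction pvStripA l with
  | case1 rest q hq ih =>
    rw [pvStripB_eqn]
    simp [pvFindBB, hq, ih]
  | case2 rest hq ih =>
    rw [pvStripB_eqn]
    simp [pvFindBB, hq]
    rw [pvStripA_no_pp ('{' :: rest) (by rw [pvFindPP_cons]; simp [hq])]
  | case3 c rest hne ih =>
    have hcc : ¬ (c = '{' ∧ rest.head? = some '{') := by
      rintro ⟨rfl, hh⟩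
      cases rest with
      | nil => simp at hh
      | cons c2 r => simp at hh; exact hne r rfl (by rw [hh])
    rw [ih, pvStripB_eqn rest, pvStripB_eqn (c :: rest), pvFindBB_cons, if_neg hcc]
    cases hbb : pvFindBB rest with
    | none => simp
    | some p =>
      simp only [Option.map_some, List.drop_succ_cons]
      cases hpp : pvFindPP (rest.drop (p + 2)) with
      | none => simp
      | some q => simp [List.take_succ_cons]
  | case4 => rw [pvStripB_eqn]; simp [pvFindBB]

-- ===== VERDICT (by name: the statement is the Claim_ definition above) =====
theorem strip_placeholders_py_spec : Claim_equal_strip_placeholders_py := by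
  intro text _
  unfold Spec_strip_placeholders_py strip_placeholders_py strip_placeholders_py_alt
  rw [pvStrip_eq]
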